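-- pv_equiv track=rewrite | github.com/hanze-hbo-ict/programmeren | _downloads/fc07cbf7a51792dc7852fec1f8f6c509/snowball.py | replace_vowels
-- ===== SOURCE A (Python) =====
-- VOWELS = "aeoiuyè"
--
-- def replace_vowels(word):
--     """Replace consonsant sounds represented by vowels with uppercase versions."""
--     index = 0
--     result = ""
--     for char in word:
--         if char == "y" and (index == 0 or word[index - 1] in VOWELS):
--                 result += "Y"
--         elif char == "i" and index > 0 and word[index - 1] in VOWELS and \
--                 index < len(word) - 1 and word[index + 1] in VOWELS:
--             result += "I"
--         else:
--             result += char
--         index += 1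
--     return result
-- ===== SOURCE B (Python) =====
-- VOWELS = "aeoiuyè"
--
-- def replace_vowels(word):
--     """Replace consonsant sounds represented by vowels with uppercase versions."""
--     out = list(word)
--     if out[:1] == ["y"]:
--         out[0] = "Y"
--     for i in range(len(word) - 1):
--         if word[i] in VOWELS:
--             if word[i + 1] == "y":
--                 out[i + 1] = "Y"
--             elif word[i + 1] == "i" and i + 2 < len(word) and word[i + 2] in VOWELS:
--                 out[i + 1] = "I"
--     return "".join(out)
-- ===== Notes on version B (the rewrite author's own statement) =====
-- stated objective: alternative
-- what changed: Instead of classifying each character by inspecting its neighbors while building the result string, B starts from a mutable copy of the word and runs a marking pass driven by the vowel positions: each vowel patches the following character in place when it is a consonant-sounding vowel, with the word-initial case hoisted out of the loop.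
import Mathlib
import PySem

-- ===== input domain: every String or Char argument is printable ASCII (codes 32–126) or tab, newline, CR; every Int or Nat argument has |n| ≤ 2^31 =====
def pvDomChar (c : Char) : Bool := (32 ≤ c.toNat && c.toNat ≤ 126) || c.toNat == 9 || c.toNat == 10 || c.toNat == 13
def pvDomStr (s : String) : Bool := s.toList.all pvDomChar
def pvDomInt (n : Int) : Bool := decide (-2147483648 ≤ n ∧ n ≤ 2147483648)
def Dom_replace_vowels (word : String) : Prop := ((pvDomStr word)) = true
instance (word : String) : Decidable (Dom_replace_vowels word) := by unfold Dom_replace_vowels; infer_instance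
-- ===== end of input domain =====

-- B replaces A's build-a-result loop that classifies each character by its neighbors with a
-- marking pass over a mutable copy of the word: each vowel position patches the character after it
-- in place when it sounds as a consonant, the word-initial case hoisted out of the loop (alternative).

-- ===== PORT A =====
def pvIsVowel (c : Char) : Bool := "aeoiuyè".toList.contains c

-- the loop body of A: state (index, result), current element c
def pvAStep (w : List Char) (st : Nat × List Char) (c : Char) : Nat × List Char :=
  let index := st.1
  let result := st.2
  if c = 'y' ∧ (index = 0 ∨ (PySem.List.pyGet? w ((index : Int) - 1)).any pvIsVowel) then
    (index + 1, result ++ ['Y'])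
  else if c = 'i' ∧ 0 < index ∧ (PySem.List.pyGet? w ((index : Int) - 1)).any pvIsVowel ∧
      index < w.length - 1 ∧ (PySem.List.pyGet? w ((index : Int) + 1)).any pvIsVowel then
    (index + 1, result ++ ['I'])
  else
    (index + 1, result ++ [c])

def replace_vowels (word : String) : String :=
  String.mk ((word.toList.foldl (pvAStep word.toList) (0, [])).2)

-- ===== PORT B =====
-- the loop body of Source B: out is the mutable copy, i the loop index (word[i], word[i+1] are always
-- in range because i < len(word) - 1, so plain getD is exact here)
def pvBStep (w : List Char) (out : List Char) (i : Nat) : List Char :=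
  if pvIsVowel (w.getD i ' ') then
    if w.getD (i + 1) ' ' = 'y' then out.set (i + 1) 'Y'
    else if w.getD (i + 1) ' ' = 'i' ∧ i + 2 < w.length ∧ pvIsVowel (w.getD (i + 2) ' ') then
      out.set (i + 1) 'I'
    else out
  else out

def replace_vowels_alt (word : String) : String :=
  let w := word.toList
    -- the word-initial patch, then the loop over range(len(word) - 1) (empty when len = 0)
  let out0 := if w.take 1 = ['y'] then w.set 0 'Y' else w
  String.mk ((List.range' 0 (w.length - 1)).foldl (pvBStep w) out0)

-- ===== PRECONDITION & SPEC =====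
def Spec_replace_vowels (word : String) (out : String) : Prop := out = replace_vowels_alt word
instance (word : String) (out : String) : Decidable (Spec_replace_vowels word out) := by unfold Spec_replace_vowels; infer_instance

-- ===== CLAIM (what is proved, stated in full; the proofs are below) =====
def Claim_equal_replace_vowels : Prop := ∀ (word : String), Dom_replace_vowels word → Spec_replace_vowels word (replace_vowels word)

-- ===== LEMMAS AND PROOFS =====

-- proof-only helpers: the neighbours of position i in w, and the character both programs emit there
def pvPrevAt (w : List Char) (i : Nat) : Option Char :=
  if i = 0 then none else some (w.getD (i - 1) ' ')
def pvNextAt (w : List Char) (i : Nat) : Option Char :=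
  if i + 1 < w.length then some (w.getD (i + 1) ' ') else none
def pvOut (p : Option Char) (c : Char) (n : Option Char) : Char :=
  if c = 'y' ∧ (p = none ∨ p.any pvIsVowel) then 'Y'
  else if c = 'i' ∧ p.any pvIsVowel ∧ n.any pvIsVowel then 'I'
  else c
def pvAt (w : List Char) (i : Nat) : Char :=
  pvOut (pvPrevAt w i) (w.getD i ' ') (pvNextAt w i)

lemma pvAStep_eq (w : List Char) (k : Nat) (acc : List Char) (c : Char)
    (hk : k < w.length) (hc : w.getD k ' ' = c) :
    pvAStep w (k, acc) c = (k + 1, acc ++ [pvAt w k]) := by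
  have hyc : (k = 0 ∨ (PySem.List.pyGet? w ((k : Int) - 1)).any pvIsVowel = true) ↔
      (pvPrevAt w k = none ∨ (pvPrevAt w k).any pvIsVowel = true) := by
    cases k with
    | zero => simp [pvPrevAt]
    | succ j =>
      simp [pvPrevAt, List.getElem?_eq_getElem (by omega : j < w.length), List.getD]
  have hprevAny : ((0 < k) ∧ (PySem.List.pyGet? w ((k : Int) - 1)).any pvIsVowel = true) ↔
      (pvPrevAt w k).any pvIsVowel = true := by
    cases k with
    | zero => simp [pvPrevAt]
    | succ j =>
      simp [pvPrevAt, List.getElem?_eq_getElem (by omega : j < w.length), List.getD]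
  have hnextAny : ((k < w.length - 1) ∧ (PySem.List.pyGet? w ((k : Int) + 1)).any pvIsVowel = true) ↔
      (pvNextAt w k).any pvIsVowel = true := by
    rw [show ((k : Int) + 1) = ((k + 1 : Nat) : Int) by push_cast; ring,
      PySem.List.pyGet?_natCast]
    by_cases h : k + 1 < w.length
    · simp [pvNextAt, h, List.getD, (by omega : k < w.length - 1)]
    · have hx : ¬ k < w.length - 1 := by omega
      simp [pvNextAt, h, hx]
  have hY : (c = 'y' ∧ (k = 0 ∨ (PySem.List.pyGet? w ((k : Int) - 1)).any pvIsVowel = true)) ↔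
      (c = 'y' ∧ (pvPrevAt w k = none ∨ (pvPrevAt w k).any pvIsVowel = true)) := by
    rw [hyc]
  have hI : (c = 'i' ∧ 0 < k ∧ (PySem.List.pyGet? w ((k : Int) - 1)).any pvIsVowel = true ∧
      k < w.length - 1 ∧ (PySem.List.pyGet? w ((k : Int) + 1)).any pvIsVowel = true) ↔
      (c = 'i' ∧ (pvPrevAt w k).any pvIsVowel = true ∧ (pvNextAt w k).any pvIsVowel = true) := by
    constructor
    · rintro ⟨h1, h2, h3, h4, h5⟩
      exact ⟨h1, hprevAny.mp ⟨h2, h3⟩, hnextAny.mp ⟨h4, h5⟩⟩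
    · rintro ⟨h1, h2, h3⟩
      obtain ⟨h4, h5⟩ := hprevAny.mpr h2
      obtain ⟨h6, h7⟩ := hnextAny.mpr h3
      exact ⟨h1, h4, h5, h6, h7⟩
  subst hc
  simp only [pvAStep, pvAt, pvOut]
  simp only [hY, hI]
  split_ifs <;> rfl

lemma pvA_fold (w : List Char) : ∀ (m : List Char) (k : Nat) (acc : List Char),
    w.drop k = m →
    (m.foldl (pvAStep w) (k, acc)).2 = acc ++ (List.range' k m.length).map (pvAt w) := by
  intro m
  induction m with
  | nil => intro k acc _; simp
  | cons c m' ih =>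
    intro k acc hdrop
    have hk : k < w.length := by
      by_contra h
      rw [List.drop_eq_nil_of_le (by omega)] at hdrop
      exact absurd hdrop (by simp)
    have hc : w.getD k ' ' = c := by
      have h1 := congrArg List.head? hdrop
      rw [List.head?_drop] at h1
      simp only [List.head?_cons] at h1
      simp [List.getD, h1]
    have hdrop' : w.drop (k + 1) = m' := by
      have h2 := congrArg List.tail hdrop
      simpa [List.tail_drop] using h2
    simp only [List.foldl_cons, pvAStep_eq w k acc c hk hc]
    rw [ih (k + 1) (acc ++ [pvAt w k]) hdrop']
    simp [List.range'_succ, List.append_assoc]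

-- one iteration of B's loop finalises position k + 1 and touches nothing else
lemma pvB_step_target (w A : List Char) (k : Nat) (hA : A.length = k + 1)
    (hk2 : k + 2 ≤ w.length) :
    pvBStep w (A ++ w.drop (k + 1)) k = A ++ pvAt w (k + 1) :: w.drop (k + 2) := by
  have hdropc : w.drop (k + 1) = w.getD (k + 1) ' ' :: w.drop (k + 2) := by
    have h1 : k + 1 < w.length := by omega
    rw [List.getD, List.getElem?_eq_getElem h1]
    simpa using (List.drop_eq_getElem_cons h1).symm
  have hset : ∀ v : Char, (A ++ w.drop (k + 1)).set (k + 1) v = A ++ v :: w.drop (k + 2) := by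
    intro v
    rw [List.set_append_right _ _ (by omega), hA, Nat.sub_self, hdropc, List.set_cons_zero]
  have hprev : pvPrevAt w (k + 1) = some (w.getD k ' ') := by simp [pvPrevAt]
  unfold pvBStep
  by_cases hv : pvIsVowel (w.getD k ' ') = true
  · by_cases hy : w.getD (k + 1) ' ' = 'y'
    · have h1 : pvAt w (k + 1) = 'Y' := by
        unfold pvAt pvOut
        rw [hprev, if_pos ⟨hy, Or.inr (by simpa using hv)⟩]
      rw [if_pos hv, if_pos hy, hset, h1]
    · by_cases hi : w.getD (k + 1) ' ' = 'i' ∧ k + 2 < w.length ∧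
          pvIsVowel (w.getD (k + 2) ' ') = true
      · have hnx : pvNextAt w (k + 1) = some (w.getD (k + 2) ' ') := by
          simp [pvNextAt, hi.2.1]
        have h1 : pvAt w (k + 1) = 'I' := by
          unfold pvAt pvOut
          rw [hprev, hnx, if_neg (fun h => hy h.1),
            if_pos ⟨hi.1, by simpa using hv, by simpa using hi.2.2⟩]
        rw [if_pos hv, if_neg hy, if_pos hi, hset, h1]
      · have h1 : pvAt w (k + 1) = w.getD (k + 1) ' ' := by
          unfold pvAt pvOut
          rw [hprev, if_neg (fun h => hy h.1), if_neg]
          rintro ⟨hc, -, hn⟩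
          by_cases h2 : k + 2 < w.length
          · have : pvNextAt w (k + 1) = some (w.getD (k + 2) ' ') := by simp [pvNextAt, h2]
            rw [this] at hn
            exact hi ⟨hc, h2, by simpa using hn⟩
          · have : pvNextAt w (k + 1) = none := by simp [pvNextAt]; omega
            rw [this] at hn
            simp at hn
        rw [if_pos hv, if_neg hy, if_neg hi, hdropc, h1]
  · have h1 : pvAt w (k + 1) = w.getD (k + 1) ' ' := by
      unfold pvAt pvOut
      rw [hprev, if_neg, if_neg]
      · rintro ⟨-, hp, -⟩; exact hv (by simp at hp; exact hp)
      · rintro ⟨-, hp⟩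
        rcases hp with hp | hp
        · exact Option.some_ne_none _ hp
        · exact hv (by simpa using hp)
    rw [if_neg hv, hdropc, h1]

-- B's invariant: after the first k loop iterations, positions 0..k are final, the rest untouched
lemma pvB_inv (w : List Char) (hw : w ≠ []) : ∀ (k : Nat), k ≤ w.length - 1 →
    (List.range' 0 k).foldl (pvBStep w)
        (if w.take 1 = ['y'] then w.set 0 'Y' else w) =
      (List.range' 0 (k + 1)).map (pvAt w) ++ w.drop (k + 1) := by
  intro k
  induction k with
  | zero =>
    intro _
    obtain ⟨c, rest, rfl⟩ : ∃ c rest, w = c :: rest := by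
      cases w with
      | nil => exact absurd rfl hw
      | cons c rest => exact ⟨c, rest, rfl⟩
    have h0 : pvAt (c :: rest) 0 = if c = 'y' then 'Y' else c := by
      unfold pvAt pvOut pvPrevAt
      simp only [List.getD_cons_zero]
      by_cases hc : c = 'y'
      · rw [if_pos ⟨hc, Or.inl rfl⟩, if_pos hc]
      · rw [if_neg (fun h => hc h.1), if_neg (by rintro ⟨-, hp, -⟩; simp at hp), if_neg hc]
    simp only [List.range'_zero, List.foldl_nil, List.range'_one,
      List.drop_succ_cons, List.drop_zero]
    by_cases hc : c = 'y'
    · subst hc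
      simp [h0]
    · simp [h0, hc]
  | succ k ih =>
    intro hk
    have hk' : k ≤ w.length - 1 := by omega
    have hlen1 : 1 ≤ w.length := by
      cases w with
      | nil => exact absurd rfl hw
      | cons _ _ => simp
    have hk2 : k + 2 ≤ w.length := by omega
    rw [List.range'_1_concat, List.foldl_append, ih hk']
    simp only [List.foldl_cons, List.foldl_nil, Nat.zero_add]
    rw [pvB_step_target w _ k (by simp) hk2]
    simp [List.range'_1_concat, List.append_assoc]

-- ===== VERDICT (by name: the statement is the Claim_ definition above) =====
theorem replace_vowels_spec : Claim_equal_replace_vowels := by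
  intro word _
  unfold Spec_replace_vowels replace_vowels replace_vowels_alt
  dsimp only
  rw [pvA_fold word.toList word.toList 0 [] (by simp)]
  by_cases hw : word.toList = []
  · simp [hw]
  · have hlen : 1 ≤ word.toList.length := by
      cases h : word.toList with
      | nil => exact absurd h hw
      | cons _ _ => simp
    rw [pvB_inv word.toList hw (word.toList.length - 1) le_rfl]
    rw [show word.toList.length - 1 + 1 = word.toList.length by omega,
      List.drop_eq_nil_of_le (by simp), List.append_nil, List.nil_append]
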